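-- pv_equiv track=rewrite | github.com/Cherimolah/roleplayhelper | service/text_processors.py | check_message_length
-- ===== SOURCE A (Python) =====
-- def check_message_length(text: str, min_chars: int = 300) -> bool:
--     """
--     Проверяет длину сообщения для режима от первого лица
--     Убирает команды бота, повторяющиеся слова и пробелы
--     """
--     # Убираем команды бота (начинаются с /)
--     lines = text.split('\n')
--     filtered_lines = []
--     for line in lines:
--         if not line.strip().startswith('/'):
--             filtered_lines.append(line)
--     text = '\n'.join(filtered_lines)
--
--     # Убираем пробелы
--     text_no_spaces = ''.join(text.split())
--
--     # Убираем повторяющиеся слова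
--     words = text.split()
--     unique_words = []
--     seen_words = set()
--     for word in words:
--         if word.lower() not in seen_words:
--             seen_words.add(word.lower())
--             unique_words.append(word)
--
--     unique_text = ' '.join(unique_words)
--     unique_text_no_spaces = ''.join(unique_text.split())
--
--     # Проверяем длину
--     return len(unique_text_no_spaces) >= min_chars
-- ===== SOURCE B (Python) =====
-- def check_message_length(text: str, min_chars: int = 300) -> bool:
--     """Back-to-front: a last-write-wins dict over the reversed word stream keeps
--     each lowercased word's FIRST-occurrence length; sum the stored lengths."""
--     words = [w
--              for line in text.split('\n')
--              if not line.strip().startswith('/')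
--              for w in line.split()]
--     first_len = {w.lower(): len(w) for w in reversed(words)}
--     return sum(first_len.values()) >= min_chars
-- ===== Notes on version B (the rewrite author's own statement) =====
-- stated objective: alternative
-- what changed: Replaces A's forward seen-set/unique-list/join/re-split/len pipeline by a back-to-front construction: a dict comprehension over the reversed word stream whose last-write-wins overwriting keeps exactly the first occurrence's length per lowercased word, then sums the dict's values; no seen-set, no conditional, no intermediate strings.
import Mathlib
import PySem

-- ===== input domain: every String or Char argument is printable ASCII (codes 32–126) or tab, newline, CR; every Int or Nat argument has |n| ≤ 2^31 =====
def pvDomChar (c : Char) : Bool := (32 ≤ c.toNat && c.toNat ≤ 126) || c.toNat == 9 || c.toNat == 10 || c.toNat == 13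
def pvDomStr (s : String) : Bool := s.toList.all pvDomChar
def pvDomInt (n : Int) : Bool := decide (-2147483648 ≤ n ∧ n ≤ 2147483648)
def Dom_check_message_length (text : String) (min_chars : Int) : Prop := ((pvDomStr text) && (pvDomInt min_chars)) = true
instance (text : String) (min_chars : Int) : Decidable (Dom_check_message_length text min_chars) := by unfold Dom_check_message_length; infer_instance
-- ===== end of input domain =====

-- B replaces A's forward seen-set pipeline by a back-to-front last-write-wins dict whose
-- values are summed (objective: alternative, same cost).

-- ===== PORT A =====
-- literal transliteration of A (Chars level; the dead text_no_spaces is kept as a discarded let)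
def check_message_length (text : String) (min_chars : Int) : Bool :=
  let lines := PySem.Chars.splitOn text.toList ['\n']
  let filtered_lines := lines.foldl (fun acc line =>
    if !(PySem.Chars.startswith (PySem.Chars.strip line) ['/']) = true then acc ++ [line] else acc) []
  let t := PySem.Chars.join ['\n'] filtered_lines
  let _text_no_spaces := PySem.Chars.join [] (PySem.Chars.split₀ t)
  let words := PySem.Chars.split₀ t
  let st := words.foldl (fun (p : List (List Char) × PySem.Set (List Char)) word =>
      if p.2.contains (PySem.Chars.lower word) then p
      else (p.1 ++ [word], p.2.add (PySem.Chars.lower word))) ([], PySem.Set.ofList [])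
  let unique_text := PySem.Chars.join [' '] st.1
  let unique_text_no_spaces := PySem.Chars.join [] (PySem.Chars.split₀ unique_text)
  decide (min_chars ≤ (unique_text_no_spaces.length : Int))

-- ===== PORT B =====
-- literal transliteration of Source B: the word comprehension, the dict comprehension over
-- reversed(words) (a foldl of Dict.insert over words.reverse), then sum of the values
def check_message_length_alt (text : String) (min_chars : Int) : Bool :=
  let words := ((PySem.Chars.splitOn text.toList ['\n']).filter
      (fun line => !(PySem.Chars.startswith (PySem.Chars.strip line) ['/']))).flatMap
      PySem.Chars.split₀
  let first_len := words.reverse.foldl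
      (fun d w => PySem.Dict.insert d (PySem.Chars.lower w) ((w.length : Int)))
      PySem.Dict.empty
  decide (min_chars ≤ first_len.values.sum)

-- ===== PRECONDITION & SPEC =====
def Spec_check_message_length (text : String) (min_chars : Int) (out : Bool) : Prop := out = check_message_length_alt text min_chars
instance (text : String) (min_chars : Int) (out : Bool) : Decidable (Spec_check_message_length text min_chars out) := by unfold Spec_check_message_length; infer_instance

-- ===== CLAIM (what is proved, stated in full; the proofs are below) =====
def Claim_equal_check_message_length : Prop := ∀ (text : String) (min_chars : Int), Dom_check_message_length text min_chars → Spec_check_message_length text min_chars (check_message_length text min_chars)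

-- ===== LEMMAS AND PROOFS =====

-- word property: nonempty and whitespace-free
def pvWord (w : List Char) : Prop := w ≠ [] ∧ ∀ c ∈ w, PySem.Chars.isspace c = false

-- go with an accumulator prepends the accumulator's reverse
lemma go_acc (s : List Char) : ∀ cur acc, PySem.Chars.split₀.go s cur acc
    = acc.reverse ++ PySem.Chars.split₀.go s cur [] := by
  induction s with
  | nil => intro cur acc; simp [PySem.Chars.split₀.go]; split <;> simp
  | cons c rest ih =>
    intro cur acc
    simp only [PySem.Chars.split₀.go]
    split
    · split
      · exact ih [] acc
      · rw [ih [] (cur.reverse :: acc), ih [] [cur.reverse]]; simp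
    · exact ih (c :: cur) acc

-- splitting at a whitespace character splits the split₀ result
lemma go_ws_append {c : Char} (hc : PySem.Chars.isspace c = true) :
    ∀ (a b : List Char) cur, PySem.Chars.split₀.go (a ++ c :: b) cur []
      = PySem.Chars.split₀.go a cur [] ++ PySem.Chars.split₀.go b [] [] := by
  intro a
  induction a with
  | nil =>
    intro b cur
    simp only [List.nil_append, PySem.Chars.split₀.go, hc]
    by_cases h : cur = []
    · simp [h]
    · rw [go_acc b [] [cur.reverse]]; simp [h]
  | cons d a ih =>
    intro b cur
    simp only [List.cons_append, PySem.Chars.split₀.go]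
    split
    · split
      · exact ih b []
      · rw [go_acc (a ++ c :: b) [] [cur.reverse], ih b [], go_acc a [] [cur.reverse]]; simp
    · exact ih b _

lemma split₀_ws_append {c : Char} (hc : PySem.Chars.isspace c = true) (a b : List Char) :
    PySem.Chars.split₀ (a ++ c :: b) = PySem.Chars.split₀ a ++ PySem.Chars.split₀ b := by
  simpa [PySem.Chars.split₀] using go_ws_append hc a b []

-- split₀ of a '\n'-join is the concatenation of the per-line splits
lemma split₀_join_nl (ls : List (List Char)) :
    PySem.Chars.split₀ (PySem.Chars.join ['\n'] ls) = (ls.map PySem.Chars.split₀).flatten := by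
  induction ls with
  | nil => rfl
  | cons l ls ih =>
    cases ls with
    | nil => simp [PySem.Chars.join, List.intercalate]
    | cons m ms =>
      have : PySem.Chars.join ['\n'] (l :: m :: ms) = l ++ '\n' :: PySem.Chars.join ['\n'] (m :: ms) := by
        simp [PySem.Chars.join, List.intercalate, List.intersperse]
      rw [this, split₀_ws_append (by decide), ih]
      simp

-- split₀ of a single word is that word
lemma go_word : ∀ (w : List Char) cur, (∀ c ∈ w, PySem.Chars.isspace c = false) →
    PySem.Chars.split₀.go w cur [] =
      (if (cur.reverse ++ w).isEmpty then [] else [cur.reverse ++ w]) := by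
  intro w
  induction w with
  | nil => intro cur _; simp [PySem.Chars.split₀.go, List.isEmpty_iff]
  | cons c rest ih =>
    intro cur h
    have hc : PySem.Chars.isspace c = false := h c (by simp)
    simp only [PySem.Chars.split₀.go, hc]
    rw [ih (c :: cur) (fun d hd => h d (by simp [hd]))]
    simp

lemma split₀_word {w : List Char} (hw : pvWord w) : PySem.Chars.split₀ w = [w] := by
  obtain ⟨h1, h2⟩ := hw
  have := go_word w [] h2
  simpa [PySem.Chars.split₀, List.isEmpty_iff, h1] using this

-- split₀ of a space-join of words gives back the words
lemma split₀_join_sp (ws : List (List Char)) (hw : ∀ w ∈ ws, pvWord w) :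
    PySem.Chars.split₀ (PySem.Chars.join [' '] ws) = ws := by
  induction ws with
  | nil => rfl
  | cons w ws ih =>
    cases ws with
    | nil =>
      simp [PySem.Chars.join, List.intercalate]
      exact split₀_word (hw w (by simp))
    | cons m ms =>
      have : PySem.Chars.join [' '] (w :: m :: ms) = w ++ ' ' :: PySem.Chars.join [' '] (m :: ms) := by
        simp [PySem.Chars.join, List.intercalate, List.intersperse]
      rw [this, split₀_ws_append (by decide), split₀_word (hw w (by simp)),
        ih (fun x hx => hw x (by simp [hx]))]
      rfl

-- length of an empty-separator join
lemma join_nil_length (ws : List (List Char)) :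
    (PySem.Chars.join [] ws).length = ((ws.map List.length).sum) := by
  induction ws with
  | nil => rfl
  | cons w ws ih =>
    cases ws with
    | nil => simp [PySem.Chars.join, List.intercalate]
    | cons m ms =>
      have : PySem.Chars.join [] (w :: m :: ms) = w ++ PySem.Chars.join [] (m :: ms) := by
        simp [PySem.Chars.join, List.intercalate, List.intersperse]
      rw [this]
      simp only [List.length_append, ih, List.map_cons, List.sum_cons]

-- every word produced by split₀ is nonempty and whitespace-free
lemma go_words_pvWord : ∀ (s : List Char) cur acc,
    (∀ w ∈ acc, pvWord w) → (∀ c ∈ cur, PySem.Chars.isspace c = false) →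
    ∀ w ∈ PySem.Chars.split₀.go s cur acc, pvWord w := by
  intro s
  induction s with
  | nil =>
    intro cur acc hacc hcur w hw
    simp only [PySem.Chars.split₀.go] at hw
    split at hw
    · exact hacc w (by simpa using hw)
    · next h =>
      simp only [List.mem_reverse, List.mem_cons] at hw
      rcases hw with h1 | h1
      · subst h1
        exact ⟨by simpa [List.isEmpty_iff] using h, fun c hc => hcur c (by simpa using hc)⟩
      · exact hacc w h1
  | cons c rest ih =>
    intro cur acc hacc hcur w hw
    simp only [PySem.Chars.split₀.go] at hw
    split at hw
    · next hc =>
      split at hw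
      · exact ih [] acc hacc (by simp) w hw
      · next h =>
        refine ih [] _ ?_ (by simp) w hw
        intro x hx
        rcases List.mem_cons.mp hx with h1 | h1
        · subst h1
          exact ⟨by simpa [List.isEmpty_iff] using h, fun d hd => hcur d (by simpa using hd)⟩
        · exact hacc x h1
    · next hc =>
      refine ih (c :: cur) acc hacc ?_ w hw
      intro d hd
      rcases List.mem_cons.mp hd with h1 | h1
      · subst h1; simpa using hc
      · exact hcur d h1

lemma split₀_pvWord (s : List Char) : ∀ w ∈ PySem.Chars.split₀ s, pvWord w :=
  go_words_pvWord s [] [] (by simp) (by simp)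

-- A's dedup step
def aStep (p : List (List Char) × PySem.Set (List Char)) (word : List Char) :
    List (List Char) × PySem.Set (List Char) :=
  if p.2.contains (PySem.Chars.lower word) then p
  else (p.1 ++ [word], p.2.add (PySem.Chars.lower word))

-- A's fold only appends to its accumulator
lemma afold_acc (ws : List (List Char)) : ∀ u s,
    ws.foldl aStep (u, s) = (u ++ (ws.foldl aStep ([], s)).1, (ws.foldl aStep ([], s)).2) := by
  induction ws with
  | nil => intro u s; simp
  | cons w ws ih =>
    intro u s
    simp only [List.foldl_cons, aStep]
    split
    · exact ih u s
    · simp only [List.nil_append]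
      rw [ih (u ++ [w]) _, ih [w] _]; simp

-- elements of A's unique list come from the word list
lemma afold_mem (ws : List (List Char)) : ∀ s w, w ∈ (ws.foldl aStep ([], s)).1 → w ∈ ws := by
  induction ws with
  | nil => intro s w h; simp at h
  | cons v ws ih =>
    intro s w h
    simp only [List.foldl_cons, aStep] at h
    split at h
    · exact List.mem_cons_of_mem v (ih _ w h)
    · rw [afold_acc] at h
      simp only [List.nil_append] at h
      rcases List.mem_append.mp h with h1 | h1
      · simp only [List.mem_singleton] at h1; simp [h1]
      · exact List.mem_cons_of_mem v (ih _ w h1)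

-- lowers of A's unique list avoid the seen set
lemma afold_notin (ws : List (List Char)) : ∀ (s : PySem.Set (List Char)) w,
    w ∈ (ws.foldl aStep ([], s)).1 → PySem.Chars.lower w ∉ s := by
  induction ws with
  | nil => intro s w h; simp at h
  | cons v ws ih =>
    intro s w h
    simp only [List.foldl_cons, aStep] at h
    split at h
    · exact ih s w h
    · next hv =>
      rw [afold_acc] at h
      simp only [List.nil_append] at h
      rcases List.mem_append.mp h with h1 | h1
      · simp only [List.mem_singleton] at h1
        subst h1
        intro hmem
        exact hv ((PySem.Set.contains_iff s _).mpr hmem)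
      · intro hmem
        exact ih _ w h1 ((PySem.Set.mem_add _ _ _).mpr (Or.inl hmem))

-- each element of A's unique list is the FIRST word of ws with its lowercase
lemma afold_first (ws : List (List Char)) : ∀ (s : PySem.Set (List Char)) w,
    w ∈ (ws.foldl aStep ([], s)).1 →
    ws.find? (fun x => PySem.Chars.lower x == PySem.Chars.lower w) = some w := by
  induction ws with
  | nil => intro s w h; simp at h
  | cons v ws ih =>
    intro s w h
    simp only [List.foldl_cons, aStep] at h
    split at h
    · next hv =>
      have hne : PySem.Chars.lower v ≠ PySem.Chars.lower w := by
        intro he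
        exact afold_notin ws s w h (he ▸ (PySem.Set.contains_iff s _).mp hv)
      rw [List.find?_cons_of_neg (by simpa using hne)]
      exact ih s w h
    · next hv =>
      rw [afold_acc] at h
      simp only [List.nil_append] at h
      rcases List.mem_append.mp h with h1 | h1
      · simp only [List.mem_singleton] at h1
        subst h1
        exact List.find?_cons_of_pos (by simp)
      · have hne : PySem.Chars.lower v ≠ PySem.Chars.lower w := by
          intro he
          have := afold_notin ws _ w h1
          exact this (he ▸ (PySem.Set.mem_add _ _ _).mpr (Or.inr rfl))
        rw [List.find?_cons_of_neg (by simpa using hne)]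
        exact ih _ w h1
-- lowers of A's unique list are distinct
lemma afold_nodup (ws : List (List Char)) : ∀ (s : PySem.Set (List Char)),
    ((ws.foldl aStep ([], s)).1.map PySem.Chars.lower).Nodup := by
  induction ws with
  | nil => intro s; simp
  | cons v ws ih =>
    intro s
    simp only [List.foldl_cons, aStep]
    split
    · exact ih s
    · simp only [List.nil_append]
      rw [afold_acc]
      simp only [List.map_append, List.map_cons, List.map_nil]
      refine List.Nodup.append (by simp) (ih _) ?_
      intro k hk1 hk2
      simp only [List.mem_singleton, List.mem_map] at hk1 hk2
      rcases hk2 with ⟨w, hw, hlow⟩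
      exact afold_notin ws _ w hw (by
        subst hlow; rw [hk1]
        exact (PySem.Set.mem_add _ _ _).mpr (Or.inr rfl))

-- membership in the lowers of A's unique list (empty initial seen set)
lemma afold_mem_lower (ws : List (List Char)) : ∀ (s : PySem.Set (List Char)) k,
    k ∉ s → (∃ w ∈ ws, PySem.Chars.lower w = k) →
    k ∈ (ws.foldl aStep ([], s)).1.map PySem.Chars.lower := by
  induction ws with
  | nil => intro s k _ h; simp at h
  | cons v ws ih =>
    intro s k hk ⟨w, hw, hlow⟩
    simp only [List.foldl_cons, aStep]
    split
    · next hv =>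
      rcases List.mem_cons.mp hw with rfl | h1
      · exact absurd ((PySem.Set.contains_iff s _).mp (hlow ▸ hv)) hk
      · exact ih s k hk ⟨w, h1, hlow⟩
    · next hv =>
      simp only [List.nil_append]
      rw [afold_acc]
      simp only [List.map_append, List.map_cons, List.map_nil]
      by_cases he : PySem.Chars.lower v = k
      · simp [he]
      · refine List.mem_append.mpr (Or.inr ?_)
        refine ih _ k ?_ ⟨w, ?_, hlow⟩
        · intro hmem
          rcases (PySem.Set.mem_add _ _ _).mp hmem with h2 | h2
          · exact hk h2
          · exact he h2.symm
        · rcases List.mem_cons.mp hw with rfl | h1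
          · exact absurd hlow he
          · exact h1

-- B's dict fold written as a foldr
def bDict (ws : List (List Char)) : PySem.Dict (List Char) Int :=
  ws.foldr (fun w d => d.insert (PySem.Chars.lower w) ((w.length : Int))) PySem.Dict.empty

-- B's dict looks up the FIRST occurrence's length
lemma bDict_get? (ws : List (List Char)) (k : List Char) :
    (bDict ws).get? k
      = (ws.find? (fun w => PySem.Chars.lower w == k)).map (fun w => (w.length : Int)) := by
  induction ws with
  | nil => simp [bDict, PySem.Dict.get?_empty]
  | cons w ws ih =>
    simp only [bDict, List.foldr_cons] at *
    rw [PySem.Dict.get?_insert]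
    by_cases he : k = PySem.Chars.lower w
    · rw [if_pos he, List.find?_cons_of_pos (by simpa using he.symm)]
      rfl
    · rw [if_neg he, List.find?_cons_of_neg (by simpa using fun h => he h.symm)]
      exact ih

lemma bDict_keys_nodup (ws : List (List Char)) : (bDict ws).keys.Nodup := by
  have : bDict ws = ws.reverse.foldl
      (fun d w => d.insert (PySem.Chars.lower w) ((w.length : Int))) PySem.Dict.empty := by
    rw [List.foldl_reverse]; rfl
  rw [this]
  exact PySem.Dict.nodup_keys_foldl_insert_key ws.reverse PySem.Chars.lower
    (fun _ w => (w.length : Int)) PySem.Dict.empty PySem.Dict.nodup_keys_empty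

lemma bDict_mem_keys (ws : List (List Char)) (k : List Char) :
    k ∈ (bDict ws).keys ↔ ∃ w ∈ ws, PySem.Chars.lower w = k := by
  rw [← not_iff_not, ← PySem.Dict.get?_eq_none_iff_not_mem_keys, bDict_get?,
    Option.map_eq_none_iff, List.find?_eq_none]
  constructor
  · intro h ⟨w, hw, hlow⟩
    exact absurd (by simpa using hlow) (h w hw)
  · intro h w hw hbe
    exact h ⟨w, hw, by simpa using hbe⟩

-- ===== VERDICT (by name: the statement is the Claim_ definition above) =====
theorem check_message_length_spec : Claim_equal_check_message_length := by
  intro text min_chars _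
  unfold Spec_check_message_length check_message_length check_message_length_alt
  simp only []
  set lines := PySem.Chars.splitOn text.toList ['\n'] with hlines
  have hfilter : lines.foldl (fun acc line =>
      if !(PySem.Chars.startswith (PySem.Chars.strip line) ['/']) = true then acc ++ [line] else acc) []
      = lines.filter (fun l => !(PySem.Chars.startswith (PySem.Chars.strip l) ['/'])) := by
    simpa using PySem.List.foldl_append_if
      (fun l => !(PySem.Chars.startswith (PySem.Chars.strip l) ['/'])) id lines []
  rw [hfilter]
  set filtered := lines.filter (fun l => !(PySem.Chars.startswith (PySem.Chars.strip l) ['/'])) with hf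
  rw [split₀_join_nl, List.flatMap_def]
  set ws := (filtered.map PySem.Chars.split₀).flatten with hws
  have hwords : ∀ w ∈ ws, pvWord w := by
    intro w hw
    rw [hws] at hw
    rcases List.mem_flatten.mp hw with ⟨l, hl, hwl⟩
    rcases List.mem_map.mp hl with ⟨x, _, rfl⟩
    exact split₀_pvWord x w hwl
  have hA : ws.foldl (fun (p : List (List Char) × PySem.Set (List Char)) word =>
      if p.2.contains (PySem.Chars.lower word) then p
      else (p.1 ++ [word], p.2.add (PySem.Chars.lower word))) ([], PySem.Set.ofList [])
      = ws.foldl aStep ([], PySem.Set.ofList []) := rfl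
  rw [hA]
  have hB : ws.reverse.foldl
      (fun d w => d.insert (PySem.Chars.lower w) ((w.length : Int))) PySem.Dict.empty
      = bDict ws := by rw [List.foldl_reverse]; rfl
  rw [hB]
  set u := (ws.foldl aStep ([], PySem.Set.ofList [])).1 with hu
  have hu_words : ∀ w ∈ u, pvWord w := fun w hw => hwords w (afold_mem ws _ w (hu ▸ hw))
  rw [split₀_join_sp u hu_words, join_nil_length]
  -- keys of B's dict are a permutation of the lowers of A's unique list
  have hperm : (bDict ws).keys.Perm (u.map PySem.Chars.lower) := by
    rw [List.perm_ext_iff_of_nodup (bDict_keys_nodup ws) (afold_nodup ws _)]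
    intro k
    rw [bDict_mem_keys]
    constructor
    · intro ⟨w, hw, hlow⟩
      exact afold_mem_lower ws _ k (by simp [PySem.Set.ofList]) ⟨w, hw, hlow⟩
    · intro hk
      rcases List.mem_map.mp hk with ⟨w, hw, hlow⟩
      exact ⟨w, afold_mem ws _ w hw, hlow⟩
  -- the sum of B's dict values is the total length of A's unique words
  have hvals : (bDict ws).values.sum = ((u.map List.length).sum : Int) := by
    rw [PySem.Dict.values_eq_map_keys (bDict ws) (bDict_keys_nodup ws) 0]
    rw [(hperm.map (fun k => (bDict ws).getD k 0)).sum_eq, List.map_map]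
    have : (u.map ((fun k => (bDict ws).getD k 0) ∘ PySem.Chars.lower))
        = u.map (fun w => (w.length : Int)) := by
      refine List.map_congr_left ?_
      intro w hw
      have hfirst := afold_first ws _ w (hu ▸ hw)
      simp only [Function.comp]
      rw [PySem.Dict.getD_eq_get?_getD, bDict_get?, hfirst]
      rfl
    rw [this, Nat.cast_list_sum, List.map_map]
    rfl
  rw [hvals]
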